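-- pv_equiv track=rewrite | github.com/BartoszKruszewski/courses-uwr | Kurs Programowania w Pythonie/lista 12/zad 4.py | get_pnf
-- ===== SOURCE A (Python) =====
-- def get_pnf(word):
--     assignments = {}
--     i = 1
--     for letter in word:
--         if letter not in assignments:
--             assignments[letter] = i
--             i += 1
--     result = ""
--     for letter in word:
--         result += str(assignments[letter]) + "-"
--     return result[:-1]
-- ===== SOURCE B (Python) =====
-- def get_pnf(word):
--     assignments = {}
--     result = []
--     for letter in word:
--         if letter not in assignments:
--             assignments[letter] = len(assignments) + 1
--         result.append(str(assignments[letter]))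
--     return "-".join(result)
-- ===== Notes on version B (the rewrite author's own statement) =====
-- stated objective: simpler
-- what changed: B fuses A's two passes into one traversal that numbers a letter on first sight via len(assignments)+1 (no separate counter) and collects the numbers in a list joined once with the dash separator, instead of A's build-table pass followed by a string-concatenation pass that trims a trailing separator.
import Mathlib
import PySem

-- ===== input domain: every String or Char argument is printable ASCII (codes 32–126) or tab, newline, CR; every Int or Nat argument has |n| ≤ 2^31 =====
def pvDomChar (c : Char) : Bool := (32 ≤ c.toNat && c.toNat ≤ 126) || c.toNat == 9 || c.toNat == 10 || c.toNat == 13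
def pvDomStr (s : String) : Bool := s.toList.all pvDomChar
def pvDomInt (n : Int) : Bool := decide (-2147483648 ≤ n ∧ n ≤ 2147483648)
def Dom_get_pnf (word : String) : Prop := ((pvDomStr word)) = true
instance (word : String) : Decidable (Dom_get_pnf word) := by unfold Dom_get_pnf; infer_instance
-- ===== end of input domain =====

-- B fuses A's two passes into one traversal numbering letters on first sight (simpler; same cost).

-- ===== PORT A =====
-- result is held as its code-point list (PySem convention; String.append is kernel-opaque);
-- assignments[letter] in the second loop always hits (letter was inserted in the first loop), ported as getD _ _ 0.
def get_pnf (word : String) : String :=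
  let st := word.toList.foldl
    (fun (s : PySem.Dict Char Int × Int) letter =>
      if s.1.contains letter = false then (s.1.insert letter s.2, s.2 + 1) else s)
    (PySem.Dict.empty, 1)
  let result : List Char := word.toList.foldl
    (fun r letter => r ++ PySem.Int.toChars (st.1.getD letter 0) ++ ['-']) []
  String.ofList (PySem.List.slice result none (some (-1)))   -- result[:-1]

-- ===== PORT B =====
def get_pnf_alt (word : String) : String :=
  let st := word.toList.foldl
    (fun (s : PySem.Dict Char Int × List String) letter =>
      let d := if s.1.contains letter = false then s.1.insert letter ((s.1.size : Int) + 1) else s.1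
      (d, s.2 ++ [PySem.Int.toStr (d.getD letter 0)]))
    (PySem.Dict.empty, [])
  PySem.Str.join "-" st.2

-- ===== PRECONDITION & SPEC =====
def Spec_get_pnf (word : String) (out : String) : Prop := out = get_pnf_alt word
instance (word : String) (out : String) : Decidable (Spec_get_pnf word out) := by unfold Spec_get_pnf; infer_instance

-- ===== CLAIM (what is proved, stated in full; the proofs are below) =====
def Claim_equal_get_pnf : Prop := ∀ (word : String), Dom_get_pnf word → Spec_get_pnf word (get_pnf word)

-- ===== LEMMAS AND PROOFS =====

-- A's first loop, as a named step function (definitionally the lambda in get_pnf).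
def pnfStep (s : PySem.Dict Char Int × Int) (letter : Char) : PySem.Dict Char Int × Int :=
  if s.1.contains letter = false then (s.1.insert letter s.2, s.2 + 1) else s

-- B's fused step, as a named function (definitionally the lambda in get_pnf_alt).
def pnfBStep (s : PySem.Dict Char Int × List String) (letter : Char) : PySem.Dict Char Int × List String :=
  let d' := if s.1.contains letter = false then s.1.insert letter ((s.1.size : Int) + 1) else s.1
  (d', s.2 ++ [PySem.Int.toStr (d'.getD letter 0)])

-- stability: once a letter has a number, the rest of the first loop never changes it
lemma pnf_stable (ws : List Char) : ∀ (d : PySem.Dict Char Int) (i : Int) (c : Char) (v : Int),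
    d.get? c = some v → ((ws.foldl pnfStep (d, i)).1).get? c = some v := by
  induction ws with
  | nil => intro d i c v h; simpa using h
  | cons a t ih =>
    intro d i c v h
    simp only [List.foldl_cons, pnfStep]
    by_cases hc : d.contains a = false
    · have hne : c ≠ a := by
        intro he; subst he
        rw [PySem.Dict.contains_eq_isSome_get?, h] at hc; simp at hc
      simp only [hc, if_true]
      exact ih _ _ _ _ (by rw [PySem.Dict.get?_insert_of_ne]; exact h; exact hne)
    · simp only [hc]
      exact ih _ _ _ _ h

-- B's fused loop: the dict it builds is A's dict, and the list it collects is the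
-- numbering of the traversed letters under the FINAL dict of A's first loop.
lemma pnf_fused (ws : List Char) : ∀ (d : PySem.Dict Char Int) (i : Int) (acc : List String),
    i = (d.size : Int) + 1 → d.keys.Nodup →
    ws.foldl pnfBStep (d, acc)
      = ((ws.foldl pnfStep (d, i)).1,
         acc ++ ws.map (fun c => PySem.Int.toStr (((ws.foldl pnfStep (d, i)).1).getD c 0))) := by
  induction ws with
  | nil => intro d i acc _ _; simp
  | cons a t ih =>
    intro d i acc hi hnd
    by_cases hc : d.contains a = false
    · -- new letter: both insert; the assigned number is i = size + 1
      have hins : d.insert a ((d.size : Int) + 1) = d.insert a i := by rw [hi]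
      have hget : (d.insert a i).get? a = some i := by
        simp [PySem.Dict.get?_insert_self]
      have hfin : ((t.foldl pnfStep (d.insert a i, i + 1)).1).get? a = some i :=
        pnf_stable t _ _ _ _ hget
      have hsz : i + 1 = (((d.insert a i).size : Int)) + 1 := by
        rw [PySem.Dict.size_insert]; simp [hc]; omega
      have hnd' : (d.insert a i).keys.Nodup := PySem.Dict.nodup_keys_insert _ _ _ hnd
      have hstep : (a :: t).foldl pnfStep (d, i) = t.foldl pnfStep (d.insert a i, i + 1) := by
        simp [pnfStep, hc]
      have hB : pnfBStep (d, acc) a = (d.insert a i, acc ++ [PySem.Int.toStr i]) := by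
        simp only [pnfBStep, hc, if_true, hins]
        rw [PySem.Dict.getD_insert_self]
      rw [hstep, List.foldl_cons, hB, ih (d.insert a i) (i + 1) _ hsz hnd']
      simp only [List.map_cons, List.append_assoc, List.singleton_append]
      congr 2
      rw [PySem.Dict.getD_eq_get?_getD, hfin]; rfl
    · -- seen letter: dict unchanged; its number is already fixed and survives to the end
      have hc' : d.contains a = true := by revert hc; cases h : d.contains a <;> simp
      obtain ⟨v, hv⟩ : ∃ v, d.get? a = some v := by
        have hce := PySem.Dict.contains_eq_isSome_get? (d := d) (k := a)
        rw [hc'] at hce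
        cases h : d.get? a with
        | none => rw [h] at hce; simp at hce
        | some v => exact ⟨v, rfl⟩
      have hstep : (a :: t).foldl pnfStep (d, i) = t.foldl pnfStep (d, i) := by
        simp [pnfStep, hc']
      have hfin : ((t.foldl pnfStep (d, i)).1).get? a = some v := pnf_stable t _ _ _ _ hv
      have hB : pnfBStep (d, acc) a = (d, acc ++ [PySem.Int.toStr (d.getD a 0)]) := by
        simp [pnfBStep, hc']
      rw [hstep, List.foldl_cons, hB, ih d i _ hi hnd]
      simp only [List.map_cons, List.append_assoc, List.singleton_append]
      congr 3
      rw [PySem.Dict.getD_eq_get?_getD, hv, PySem.Dict.getD_eq_get?_getD, hfin]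

-- dropping the trailing '-' of A's concatenation is exactly joining with '-'
lemma pnf_join (parts : List String) :
    ((parts.flatMap (fun s => s.toList ++ ['-'])).dropLast)
      = PySem.Chars.join ['-'] (parts.map String.toList) := by
  induction parts with
  | nil => simp [PySem.Chars.join_nil]
  | cons p t ih =>
    cases t with
    | nil => simp [PySem.Chars.join_singleton]
    | cons q r =>
      simp only [List.map_cons]
      rw [PySem.Chars.join_cons_cons]
      have hne : (q :: r).flatMap (fun s => s.toList ++ ['-']) ≠ [] := by
        intro h; exact absurd (congrArg List.length h) (by simp)
      rw [List.flatMap_cons, List.dropLast_append_of_ne_nil hne, ih]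
      simp [List.append_assoc]

-- ===== VERDICT (by name: the statement is the Claim_ definition above) =====
theorem get_pnf_spec : Claim_equal_get_pnf := by
  intro word _
  unfold Spec_get_pnf get_pnf get_pnf_alt
  rw [show (fun (s : PySem.Dict Char Int × List String) letter =>
      let d' := if s.1.contains letter = false then s.1.insert letter ((s.1.size : Int) + 1) else s.1
      (d', s.2 ++ [PySem.Int.toStr (d'.getD letter 0)])) = pnfBStep from rfl]
  have hfold := pnf_fused word.toList PySem.Dict.empty 1 [] (by simp) (by simp)
  simp only [hfold]
  set D := ((word.toList.foldl pnfStep (PySem.Dict.empty, 1)).1) with hD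
  have hA1 : word.toList.foldl
      (fun (s : PySem.Dict Char Int × Int) letter =>
        if s.1.contains letter = false then (s.1.insert letter s.2, s.2 + 1) else s)
      (PySem.Dict.empty, 1) = word.toList.foldl pnfStep (PySem.Dict.empty, 1) := rfl
  rw [hA1, ← hD]
  simp only [List.append_assoc]
  rw [PySem.List.foldl_append_eq_flatMap (g := fun c => PySem.Int.toChars (D.getD c 0) ++ ['-'])]
  rw [PySem.List.slice_to_neg_one]
  have hflat : (word.toList.flatMap (fun c => PySem.Int.toChars (D.getD c 0) ++ ['-']))
      = ((word.toList.map (fun c => PySem.Int.toStr (D.getD c 0))).flatMap (fun s => s.toList ++ ['-'])) := by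
    rw [List.flatMap_map]
    apply List.flatMap_congr; intro c _
    rw [PySem.Int.toList_toStr]
  rw [List.nil_append, hflat, pnf_join]
  simp [PySem.Str.join]
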